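-- pv_equiv track=rewrite | github.com/thelpix/tareaIP | Python/guia8.py | separar_palabras
-- ===== SOURCE A (Python) =====
-- def separar_palabras(palabras: str) -> list[str]:
--     palabra: str = ""
--     lista_palabra : list[str] = []
--     for i in range(len(palabras)):
--         if  ('a' <= palabras[i] <= 'z') or ('A' <= palabras[i] <= 'Z'):
--             palabra += palabras[i]
--         else:
--             if palabra:
--                 lista_palabra.append(palabra)
--                 palabra = ""
--     if palabra:
--         lista_palabra.append(palabra)
--     return lista_palabra
-- ===== SOURCE B (Python) =====
-- def separar_palabras(palabras: str) -> list[str]: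
--     # Scan by runs: skip non-letters, then find the end of each maximal
--     # ASCII-letter run and slice it out, instead of growing an accumulator.
--     def es_letra(c: str) -> bool:
--         return 'a' <= c <= 'z' or 'A' <= c <= 'Z'
--     res: list[str] = []
--     i = 0
--     n = len(palabras)
--     while i < n:
--         if es_letra(palabras[i]):
--             j = i + 1
--             while j < n and es_letra(palabras[j]):
--                 j += 1
--             res.append(palabras[i:j])
--             i = j
--         else:
--             i += 1
--     return res
-- ===== Notes on version B (the rewrite author's own statement) =====
-- stated objective: alternative
-- what changed: B finds each maximal letter run by scanning for its end index and slicing it out in one piece, instead of A's character-by-character accumulator string with flush-on-delimiter logic.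
import Mathlib
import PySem

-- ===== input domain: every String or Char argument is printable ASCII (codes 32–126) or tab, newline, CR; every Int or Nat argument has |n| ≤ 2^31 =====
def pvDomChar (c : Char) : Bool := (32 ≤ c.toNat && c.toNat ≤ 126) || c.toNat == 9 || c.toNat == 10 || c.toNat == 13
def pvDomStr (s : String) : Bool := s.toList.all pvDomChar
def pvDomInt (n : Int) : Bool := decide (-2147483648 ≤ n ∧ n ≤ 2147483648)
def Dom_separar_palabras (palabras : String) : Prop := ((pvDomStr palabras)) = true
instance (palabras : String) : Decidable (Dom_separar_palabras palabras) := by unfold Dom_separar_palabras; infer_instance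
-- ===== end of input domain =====

-- B extracts each maximal ASCII-letter run by scanning to its end and slicing,
-- instead of A's per-character accumulator with flush-on-delimiter; same return value.

-- ===== PORT A =====
def pvLetter (c : Char) : Bool := ('a' ≤ c && c ≤ 'z') || ('A' ≤ c && c ≤ 'Z')

-- A: fold over the characters, growing the current word and flushing it on a delimiter.
def separar_palabras (palabras : String) : List String :=
  let st := palabras.toList.foldl
    (fun (st : List Char × List String) c =>
      if pvLetter c then (st.1 ++ [c], st.2)
      else if st.1 ≠ [] then ([], st.2 ++ [String.ofList st.1]) else st)
    ([], [])
  if st.1 ≠ [] then st.2 ++ [String.ofList st.1] else st.2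

-- ===== PORT B =====
-- B: skip non-letters; at a letter, take the whole maximal run at once and recurse after it.
def pvWordsB : List Char → List String
  | [] => []
  | c :: cs =>
    if pvLetter c then
      String.ofList (c :: cs.takeWhile pvLetter) :: pvWordsB (cs.dropWhile pvLetter)
    else pvWordsB cs
termination_by cs => cs.length
decreasing_by
  · exact Nat.lt_succ_of_le (cs.length_dropWhile_le pvLetter)
  · exact Nat.lt_succ_self _

def separar_palabras_alt (palabras : String) : List String := pvWordsB palabras.toList

-- ===== PRECONDITION & SPEC =====
def Spec_separar_palabras (palabras : String) (out : List String) : Prop := out = separar_palabras_alt palabras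
instance (palabras : String) (out : List String) : Decidable (Spec_separar_palabras palabras out) := by unfold Spec_separar_palabras; infer_instance

-- ===== CLAIM (what is proved, stated in full; the proofs are below) =====
def Claim_equal_separar_palabras : Prop := ∀ (palabras : String), Dom_separar_palabras palabras → Spec_separar_palabras palabras (separar_palabras palabras)

-- ===== LEMMAS AND PROOFS =====

-- Mirror of A's fold, written as recursion on the input with the pending word as parameter.
def pvCombine : List Char → List Char → List String
  | p, [] => if p ≠ [] then [String.ofList p] else []
  | p, c :: cs =>
    if pvLetter c then pvCombine (p ++ [c]) cs
    else if p ≠ [] then String.ofList p :: pvCombine [] cs else pvCombine [] cs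

theorem pvFoldA_eq (cs : List Char) : ∀ (p : List Char) (acc : List String),
    (let st := cs.foldl
      (fun (st : List Char × List String) c =>
        if pvLetter c then (st.1 ++ [c], st.2)
        else if st.1 ≠ [] then ([], st.2 ++ [String.ofList st.1]) else st)
      (p, acc);
     if st.1 ≠ [] then st.2 ++ [String.ofList st.1] else st.2) = acc ++ pvCombine p cs := by
  induction cs with
  | nil => intro p acc; by_cases h : p = [] <;> simp [pvCombine, h]
  | cons c cs ih =>
    intro p acc
    by_cases hc : pvLetter c
    · simpa [List.foldl_cons, hc, pvCombine] using ih (p ++ [c]) acc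
    · by_cases hp : p = []
      · simpa [List.foldl_cons, hc, hp, pvCombine] using ih [] acc
      · simpa [List.foldl_cons, hc, hp, pvCombine] using ih [] (acc ++ [String.ofList p])

theorem pvWordsB_eq (cs : List Char) :
    pvWordsB cs =
      (if cs.takeWhile pvLetter = [] then [] else [String.ofList (cs.takeWhile pvLetter)])
        ++ pvWordsB (cs.dropWhile pvLetter) := by
  cases cs with
  | nil => simp [pvWordsB]
  | cons c cs =>
    by_cases hc : pvLetter c <;> simp [pvWordsB, hc]

theorem pvCombine_eq (cs : List Char) : ∀ (p : List Char),
    pvCombine p cs =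
      (if p ++ cs.takeWhile pvLetter = [] then [] else [String.ofList (p ++ cs.takeWhile pvLetter)])
        ++ pvWordsB (cs.dropWhile pvLetter) := by
  induction cs with
  | nil => intro p; by_cases h : p = [] <;> simp [pvCombine, pvWordsB, h]
  | cons c cs ih =>
    intro p
    by_cases hc : pvLetter c
    · rw [show pvCombine p (c :: cs) = pvCombine (p ++ [c]) cs by simp [pvCombine, hc]]
      rw [ih (p ++ [c])]
      simp [hc]
    · have h0 : pvCombine [] cs =
          (if cs.takeWhile pvLetter = [] then [] else [String.ofList (cs.takeWhile pvLetter)])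
            ++ pvWordsB (cs.dropWhile pvLetter) := by simpa using ih []
      have hw : pvCombine [] cs = pvWordsB cs := by rw [h0, ← pvWordsB_eq]
      by_cases hp : p = []
      · simp [pvCombine, hc, hp, hw, pvWordsB]
      · simp [pvCombine, hc, hp, hw, pvWordsB]

-- ===== VERDICT (by name: the statement is the Claim_ definition above) =====
theorem separar_palabras_spec : Claim_equal_separar_palabras := by
  intro s _
  show separar_palabras s = separar_palabras_alt s
  rw [separar_palabras, separar_palabras_alt]
  rw [pvFoldA_eq s.toList [] [], pvCombine_eq s.toList []]
  simp only [List.nil_append]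
  exact (pvWordsB_eq s.toList).symm
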